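-- pv_equiv track=rewrite | github.com/masamoto1982/Ajisai | scripts/generate_qr.py | terminal_preview
-- ===== SOURCE A (Python) =====
-- def terminal_preview(matrix):
--     lines = []
--     quiet = 2
--     w = len(matrix)
--     for _ in range(quiet):
--         lines.append("  " * (w + quiet * 2))
--     for row in matrix:
--         line = ["  "] * quiet
--         line += ["██" if v else "  " for v in row]
--         line += ["  "] * quiet
--         lines.append("".join(line))
--     for _ in range(quiet):
--         lines.append("  " * (w + quiet * 2))
--     return "\n".join(lines)
-- ===== SOURCE B (Python) =====
-- def terminal_preview(matrix):
--     blank = "  " * (len(matrix) + 4)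
--     def cells(row):
--         return "" if not row else ("\u2588\u2588" if row[0] else "  ") + cells(row[1:])
--     def body(rows):
--         return "" if not rows else "    " + cells(rows[0]) + "    \n" + body(rows[1:])
--     return blank + "\n" + blank + "\n" + body(matrix) + blank + "\n" + blank
-- ===== Notes on version B (the rewrite author's own statement) =====
-- stated objective: alternative
-- what changed: B builds the whole output by structural recursion with direct string concatenation (recursive cell and row renderers plus a multiplied border string), instead of A's pipeline that accumulates a list of line strings over three loops and joins them with newline.
import Mathlib
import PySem

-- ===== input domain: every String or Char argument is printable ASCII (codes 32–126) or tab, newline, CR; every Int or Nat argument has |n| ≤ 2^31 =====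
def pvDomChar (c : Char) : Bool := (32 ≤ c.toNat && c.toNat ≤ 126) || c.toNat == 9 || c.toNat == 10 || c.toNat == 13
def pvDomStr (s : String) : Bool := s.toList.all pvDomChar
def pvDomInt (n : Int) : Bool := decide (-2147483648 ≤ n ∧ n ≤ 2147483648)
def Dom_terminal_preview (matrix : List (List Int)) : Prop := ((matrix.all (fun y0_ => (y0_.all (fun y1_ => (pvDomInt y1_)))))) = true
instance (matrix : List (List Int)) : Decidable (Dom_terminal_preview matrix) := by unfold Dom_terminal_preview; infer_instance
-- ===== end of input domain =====

-- B replaces A's list-of-lines-then-join pipeline by direct recursive string concatenation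
-- (structural recursion over rows and cells, no intermediate line list); objective: alternative.

-- ===== PORT A =====
-- Python "  " * n is ported as joining n copies of "  " (exact for string repetition with a nonnegative count).
def terminal_preview (matrix : List (List Int)) : String :=
  let quiet : Nat := 2
  let w := matrix.length
  let lines : List String := []
  let lines := lines ++ (List.range quiet).map (fun _ => PySem.Str.join "" (List.replicate (w + quiet * 2) "  "))
  let lines := lines ++ matrix.map (fun row =>
      PySem.Str.join "" (List.replicate quiet "  " ++ row.map (fun v => if v ≠ 0 then "██" else "  ") ++ List.replicate quiet "  "))
  let lines := lines ++ (List.range quiet).map (fun _ => PySem.Str.join "" (List.replicate (w + quiet * 2) "  "))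
  PySem.Str.join "\n" lines

-- ===== PORT B =====
-- recursive helper 'cells' of Source B
def pvCells : List Int → String
  | [] => ""
  | v :: r => (if v ≠ 0 then "██" else "  ") ++ pvCells r

-- recursive helper 'body' of Source B
def pvBody : List (List Int) → String
  | [] => ""
  | row :: rest => "    " ++ pvCells row ++ "    \n" ++ pvBody rest

def terminal_preview_alt (matrix : List (List Int)) : String :=
  let blank := PySem.Str.join "" (List.replicate (matrix.length + 4) "  ")
  blank ++ "\n" ++ blank ++ "\n" ++ pvBody matrix ++ blank ++ "\n" ++ blank

-- ===== PRECONDITION & SPEC =====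
def Spec_terminal_preview (matrix : List (List Int)) (out : String) : Prop := out = terminal_preview_alt matrix
instance (matrix : List (List Int)) (out : String) : Decidable (Spec_terminal_preview matrix out) := by unfold Spec_terminal_preview; infer_instance

-- ===== CLAIM (what is proved, stated in full; the proofs are below) =====
def Claim_equal_terminal_preview : Prop := ∀ (matrix : List (List Int)), Dom_terminal_preview matrix → Spec_terminal_preview matrix (terminal_preview matrix)

-- ===== LEMMAS AND PROOFS =====
theorem str_toList_inj (s t : String) (h : s.toList = t.toList) : s = t := String.toList_inj.mp h

theorem join_empty_cons (s : String) (l : List String) :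
    PySem.Str.join "" (s :: l) = s ++ PySem.Str.join "" l := by
  apply str_toList_inj
  cases l <;> simp [PySem.Chars.join, List.intercalate, List.intersperse]

theorem join_nl_cons (s : String) (l : List String) (h : l ≠ []) :
    PySem.Str.join "\n" (s :: l) = s ++ "\n" ++ PySem.Str.join "\n" l := by
  apply str_toList_inj
  cases l with
  | nil => exact absurd rfl h
  | cons b t => simp [PySem.Chars.join, List.intercalate, List.intersperse]

theorem join_singleton (sep s : String) : PySem.Str.join sep [s] = s := by
  apply str_toList_inj
  simp [PySem.Chars.join, List.intercalate, List.intersperse]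

theorem cells_cat (row : List Int) (tail : List String) :
    PySem.Str.join "" (row.map (fun v => if v ≠ 0 then "██" else "  ") ++ tail)
      = pvCells row ++ PySem.Str.join "" tail := by
  induction row with
  | nil => apply str_toList_inj; simp [pvCells]
  | cons v r ih =>
      rw [List.map_cons, List.cons_append, join_empty_cons, ih]
      show _ = (if v ≠ 0 then "██" else "  ") ++ pvCells r ++ _
      rw [String.append_assoc]

theorem frow_eq (row : List Int) :
    PySem.Str.join "" (List.replicate 2 "  " ++ row.map (fun v => if v ≠ 0 then "██" else "  ") ++ List.replicate 2 "  ")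
      = "    " ++ pvCells row ++ "    " := by
  show PySem.Str.join "" ("  " :: "  " :: (row.map _ ++ ["  ", "  "])) = _
  rw [join_empty_cons, join_empty_cons, cells_cat, join_empty_cons, join_singleton]
  apply str_toList_inj; simp

theorem body_eq (b : String) (m : List (List Int)) :
    PySem.Str.join "\n"
      ((m.map (fun row =>
        PySem.Str.join "" (List.replicate 2 "  " ++ row.map (fun v => if v ≠ 0 then "██" else "  ") ++ List.replicate 2 "  "))) ++ [b, b])
    = pvBody m ++ b ++ "\n" ++ b := by
  induction m with
  | nil =>
      rw [List.map_nil, List.nil_append, join_nl_cons _ _ (by simp), join_singleton]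
      apply str_toList_inj; simp [pvBody]
  | cons row rest ih =>
      rw [List.map_cons, List.cons_append, join_nl_cons _ _ (by simp), ih, frow_eq]
      apply str_toList_inj; simp [pvBody]

-- ===== VERDICT (by name: the statement is the Claim_ definition above) =====
theorem terminal_preview_spec : Claim_equal_terminal_preview := by
  intro m _
  show terminal_preview m = terminal_preview_alt m
  unfold terminal_preview terminal_preview_alt
  show PySem.Str.join "\n"
      ([] ++ (List.range 2).map _ ++ m.map _ ++ (List.range 2).map _) = _
  rw [List.nil_append]
  rw [show (List.range 2) = [0, 1] from rfl]
  rw [show m.length + 2 * 2 = m.length + 4 from rfl]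
  simp only [List.map_cons, List.map_nil, List.cons_append, List.nil_append]
  rw [join_nl_cons _ _ (by simp), join_nl_cons _ _ (by simp), body_eq]
  apply str_toList_inj; simp
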